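-- pv_equiv track=rewrite | github.com/LeandroCRafael/lc_blackjack | blackjack.py | validacao
-- ===== SOURCE A (Python) =====
-- def validacao(lista_pontuacoes, lista_ativos):
--     '''
--     Valida pontuação dos jogadores.
--
--     :param lista_pontuacoes: lista para controlar pontuações dos
--         jogadores
--     :param lista_ativos: lista para controlar situação dos jogadores
--         (True para ativo, False para inativo)
--     :return: caso algum ganhador, retorna não vazia
--     '''
--     lista_ganhadores = []
--
--     for indice_jog, situacao_jog in enumerate(lista_ativos):
--         # Se o jogador da iteração está inativo, o ignora.
--         if not situacao_jog:
--             continue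
--
--         # Recupera a pontuação
--         pontuacao_jog = lista_pontuacoes[indice_jog]
--
--         # Torna o jogador inativo caso tenha alcançado ou estourado 21
--         if pontuacao_jog >= 21:
--             lista_ativos[indice_jog] = False
--
--     # Verifique o link abaixo para ver mais sobre precedência de
--     #   operadores!
--     # https://docs.python.org/3/reference/expressions.html
--     if True not in lista_ativos:
--         # Caso não exista jogador ativo, busca a maior pontuação válida
--         # e os jogadores correspondentes.
--         max_pontuacao = max([pontuacao
--                              for pontuacao in lista_pontuacoes
--                              if pontuacao <= 21])
--
--         for id_jog, pontuacao_jog in enumerate(lista_pontuacoes):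
--             if pontuacao_jog == max_pontuacao:
--                 lista_ganhadores.append(id_jog)
--
--     return lista_ganhadores
-- ===== SOURCE B (Python) =====
-- def validacao(lista_pontuacoes, lista_ativos):
--     # Bust players that reached 21 or more (same in-place mutation as A).
--     for indice_jog, situacao_jog in enumerate(lista_ativos):
--         if situacao_jog and lista_pontuacoes[indice_jog] >= 21:
--             lista_ativos[indice_jog] = False
--
--     if True in lista_ativos:
--         return []
--
--     # Single pass: track the best valid score so far and its indices,
--     # instead of A's max() over a filtered copy followed by a second scan.
--     melhor = None
--     lista_ganhadores = []
--     for id_jog, pontuacao_jog in enumerate(lista_pontuacoes):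
--         if pontuacao_jog <= 21 and (melhor is None or pontuacao_jog > melhor):
--             melhor = pontuacao_jog
--             lista_ganhadores = [id_jog]
--         elif pontuacao_jog == melhor:
--             lista_ganhadores.append(id_jog)
--     return lista_ganhadores
-- ===== Notes on version B (the rewrite author's own statement) =====
-- stated objective: alternative
-- what changed: The two-scan winner computation (max() over a filtered copy, then a second enumerate scan collecting matching indices) is replaced by a single pass that tracks the best valid score and its index list as it goes.
import Mathlib
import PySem

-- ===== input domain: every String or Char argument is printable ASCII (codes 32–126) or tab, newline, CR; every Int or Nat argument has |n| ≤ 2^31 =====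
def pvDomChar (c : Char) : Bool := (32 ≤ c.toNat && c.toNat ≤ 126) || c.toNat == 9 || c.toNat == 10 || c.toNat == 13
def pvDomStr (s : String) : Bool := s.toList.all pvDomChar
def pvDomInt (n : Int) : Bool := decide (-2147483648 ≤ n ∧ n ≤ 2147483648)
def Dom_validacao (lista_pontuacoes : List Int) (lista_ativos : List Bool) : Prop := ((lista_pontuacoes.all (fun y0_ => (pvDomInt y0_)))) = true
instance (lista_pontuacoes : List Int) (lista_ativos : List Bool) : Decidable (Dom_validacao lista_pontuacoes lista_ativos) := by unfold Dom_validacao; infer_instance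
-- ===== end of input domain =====

-- B replaces A's two-scan winner computation (max over a filtered copy, then a second scan
-- collecting indices) by one pass tracking the best valid score and its indices; both Pythons
-- mutate lista_ativos in place identically, the equivalence proved here is about the return value.

-- ===== PORT A =====
def validacao (lista_pontuacoes : List Int) (lista_ativos : List Bool) : List Int :=
  -- first loop: bust active players with score >= 21 (in-place update of lista_ativos)
  let lista_ativos2 :=
    (PySem.List.enumerate lista_ativos).foldl
      (fun acc iv =>
        if iv.2 = false then acc        -- 'if not situacao_jog: continue'
        else
          let pontuacao_jog := PySem.List.pyGetD lista_pontuacoes iv.1 0  -- IndexError excluded by Pre_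
          if 21 ≤ pontuacao_jog then PySem.List.pySetD acc iv.1 false else acc)
      lista_ativos
  if !(lista_ativos2.contains true) then   -- 'if True not in lista_ativos:'
    match PySem.List.max? (lista_pontuacoes.filter (fun p => decide (p ≤ 21))) (fun y => y) with
    | none => []   -- Python raises ValueError here; excluded by Pre_
    | some max_pontuacao =>
      (PySem.List.enumerate lista_pontuacoes).foldl
        (fun g ip => if ip.2 = max_pontuacao then g ++ [ip.1] else g) []
  else []

-- ===== PORT B =====
def validacao_alt (lista_pontuacoes : List Int) (lista_ativos : List Bool) : List Int :=
  let lista_ativos2 :=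
    (PySem.List.enumerate lista_ativos).foldl
      (fun acc iv =>
        if iv.2 && decide (21 ≤ PySem.List.pyGetD lista_pontuacoes iv.1 0) then
          PySem.List.pySetD acc iv.1 false
        else acc)
      lista_ativos
  if lista_ativos2.contains true then []   -- 'if True in lista_ativos: return []'
  else
    -- single pass: (melhor, lista_ganhadores)
    let r :=
      (PySem.List.enumerate lista_pontuacoes).foldl
        (fun (st : Option Int × List Int) ip =>
          if ip.2 ≤ 21 ∧ st.1.all (fun b => b < ip.2) then (some ip.2, [ip.1])
          else if st.1 = some ip.2 then (st.1, st.2 ++ [ip.1])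
          else st)
        (none, [])
    r.2

-- ===== PRECONDITION & SPEC =====
-- Pre_ excludes exactly the inputs where Python A raises: an active player whose index is out of
-- range of lista_pontuacoes (IndexError), and the case where nobody survives the busting pass yet
-- no score is <= 21 (ValueError from max of an empty list).
def Pre_validacao (lista_pontuacoes : List Int) (lista_ativos : List Bool) : Prop :=
  (∀ iv ∈ PySem.List.enumerate lista_ativos, iv.2 = true → iv.1 < (lista_pontuacoes.length : Int)) ∧
  ((∀ iv ∈ PySem.List.enumerate lista_ativos,
      ¬(iv.2 = true ∧ PySem.List.pyGetD lista_pontuacoes iv.1 0 < 21)) →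
    ∃ p ∈ lista_pontuacoes, p ≤ 21)
instance (lista_pontuacoes : List Int) (lista_ativos : List Bool) : Decidable (Pre_validacao lista_pontuacoes lista_ativos) := by unfold Pre_validacao; infer_instance
def pvWitness_validacao : List Int × List Bool := ([20, 22], [true, true])

def Spec_validacao (lista_pontuacoes : List Int) (lista_ativos : List Bool) (out : List Int) : Prop := out = validacao_alt lista_pontuacoes lista_ativos
instance (lista_pontuacoes : List Int) (lista_ativos : List Bool) (out : List Int) : Decidable (Spec_validacao lista_pontuacoes lista_ativos out) := by unfold Spec_validacao; infer_instance

-- ===== CLAIM (what is proved, stated in full; the proofs are below) =====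
def Claim_equal_validacao : Prop := ∀ (lista_pontuacoes : List Int) (lista_ativos : List Bool), Dom_validacao lista_pontuacoes lista_ativos → Pre_validacao lista_pontuacoes lista_ativos → Spec_validacao lista_pontuacoes lista_ativos (validacao lista_pontuacoes lista_ativos)

-- ===== LEMMAS AND PROOFS =====

-- the two busting folds have (extensionally) the same step function
theorem bust_step_eq (lp : List Int) :
    (fun (acc : List Bool) (iv : Int × Bool) =>
      if iv.2 = false then acc
      else
        let pontuacao_jog := PySem.List.pyGetD lp iv.1 0
        if 21 ≤ pontuacao_jog then PySem.List.pySetD acc iv.1 false else acc) =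
    (fun (acc : List Bool) (iv : Int × Bool) =>
      if iv.2 && decide (21 ≤ PySem.List.pyGetD lp iv.1 0) then
        PySem.List.pySetD acc iv.1 false
      else acc) := by
  funext acc iv
  cases h : iv.2 <;> simp [h]

-- B's winner step function (named for the proofs)
def stepB : (Option Int × List Int) → (Int × Int) → (Option Int × List Int) :=
  fun st ip =>
    if ip.2 ≤ 21 ∧ st.1.all (fun b => b < ip.2) then (some ip.2, [ip.1])
    else if st.1 = some ip.2 then (st.1, st.2 ++ [ip.1])
    else st

theorem max?_id_append_singleton (ys : List Int) (x : Int) :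
    PySem.List.max? (ys ++ [x]) (fun y => y) =
      some ((PySem.List.max? ys (fun y => y)).elim x (fun m => max m x)) := by
  cases ys with
  | nil =>
      rw [List.nil_append, show ([x] : List Int) = x :: [] from rfl, PySem.List.max?_id_cons]
      simp [PySem.List.max?]
  | cons y t =>
      rw [List.cons_append, PySem.List.max?_id_cons, PySem.List.max?_id_cons]
      simp [List.foldl_append]
theorem snd_mem_of_mem_enumerate {l : List Int} {s i v : Int}
    (h : (i, v) ∈ PySem.List.enumerate l s) : v ∈ l := by
  have hv : v ∈ (PySem.List.enumerate l s).map (·.2) :=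
    List.mem_map_of_mem h
  rwa [PySem.List.map_snd_enumerate] at hv

theorem loopB_char (lp : List Int) :
    (PySem.List.enumerate lp).foldl stepB (none, []) =
      match PySem.List.max? (lp.filter (fun p => decide (p ≤ 21))) (fun y => y) with
      | none => (none, ([] : List Int))
      | some m =>
          (some m,
           ((PySem.List.enumerate lp).filter (fun ip => decide (ip.2 = m))).map (·.1)) := by
  induction lp using List.reverseRecOn with
  | nil => simp [PySem.List.enumerate, PySem.List.max?]
  | append_singleton l x ih =>
      rw [PySem.List.enumerate_append, List.foldl_append, ih, List.filter_append]
      simp only [PySem.List.enumerate_cons, PySem.List.enumerate_nil]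
      by_cases hx : x ≤ 21
      · rw [show List.filter (fun p => decide (p ≤ 21)) [x] = [x] by simp [hx],
            max?_id_append_singleton]
        cases hM : PySem.List.max? (l.filter (fun p => decide (p ≤ 21))) (fun y => y) with
        | none =>
            have hFnil : l.filter (fun p => decide (p ≤ 21)) = [] :=
              (PySem.List.max?_eq_none_iff _ _).mp hM
            have hno : ∀ p ∈ l, ¬ p ≤ 21 := by
              intro p hp hple
              have : p ∈ l.filter (fun p => decide (p ≤ 21)) := by
                simp [List.mem_filter, hp, hple]
              simp [hFnil] at this
            simp only [List.foldl_cons, List.foldl_nil, stepB]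
            simp [hx]
            intro a b hm hbx
            exact hno b (snd_mem_of_mem_enumerate hm) (hbx ▸ hx)
        | some m =>
            have hmF : m ∈ l.filter (fun p => decide (p ≤ 21)) := PySem.List.max?_mem hM
            have hm21 : m ≤ 21 := by simpa using (List.of_mem_filter hmF)
            have hmax : ∀ y ∈ l.filter (fun p => decide (p ≤ 21)), y ≤ m := by
              intro y hy; exact PySem.List.max?_isMax hM y hy
            simp only [List.foldl_cons, List.foldl_nil, stepB, Option.elim]
            rcases lt_trichotomy m x with hlt | heq | hgt
            · have hfil : (PySem.List.enumerate l).filter (fun ip => decide (ip.2 = x)) = [] := by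
                rw [List.filter_eq_nil_iff]
                rintro ⟨i, v⟩ hm hv
                simp only [decide_eq_true_eq] at hv
                have hvl : v ∈ l := snd_mem_of_mem_enumerate hm
                have : v ≤ m := hmax v (by simp [List.mem_filter, hvl, hv ▸ hx])
                omega
              simp [hx, hlt, max_eq_right hlt.le, hfil]
            · subst heq
              simp [hx, List.filter_append, List.map_append]
            · have hne : m ≠ x := by omega
              have hc1 : ¬ (x ≤ 21 ∧ (Option.all (fun b => decide (b < x)) (some m)) = true) := by
                simp; omega
              rw [if_neg hc1, if_neg (by simpa using hne)]
              simp [max_eq_left hgt.le, hne.symm]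
      · rw [show List.filter (fun p => decide (p ≤ 21)) [x] = [] by simp [hx], List.append_nil]
        cases hM : PySem.List.max? (l.filter (fun p => decide (p ≤ 21))) (fun y => y) with
        | none => simp [stepB, hx]
        | some m =>
            have hmF : m ∈ l.filter (fun p => decide (p ≤ 21)) := PySem.List.max?_mem hM
            have hm21 : m ≤ 21 := by simpa using (List.of_mem_filter hmF)
            have hne : m ≠ x := by omega
            simp only [List.foldl_cons, List.foldl_nil, stepB]
            rw [if_neg (by simp [hx]), if_neg (by simpa using hne)]
            simp [List.filter_append, hne.symm]

theorem ports_eq (lp : List Int) (la : List Bool) : validacao lp la = validacao_alt lp la := by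
  unfold validacao validacao_alt
  rw [← bust_step_eq lp]
  have hB := loopB_char lp
  unfold stepB at hB
  cases hc : ((PySem.List.enumerate la).foldl
      (fun acc iv =>
        if iv.2 = false then acc
        else
          let pontuacao_jog := PySem.List.pyGetD lp iv.1 0
          if 21 ≤ pontuacao_jog then PySem.List.pySetD acc iv.1 false else acc)
      la).contains true <;>
    simp only [hc, Bool.not_true, Bool.not_false, Bool.false_eq_true, Bool.true_eq_false,
      if_true, if_false, ite_true, ite_false]
  · rw [hB]
    cases hM : PySem.List.max? (lp.filter (fun p => decide (p ≤ 21))) (fun y => y) with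
    | none => simp
    | some m =>
        dsimp only
        have hstep : (fun (g : List Int) (ip : Int × Int) => if ip.2 = m then g ++ [ip.1] else g) =
            (fun g ip => if (fun (ip : Int × Int) => decide (ip.2 = m)) ip = true
              then g ++ [(fun (ip : Int × Int) => ip.1) ip] else g) := by
          funext g ip; simp
        rw [hstep, PySem.List.foldl_append_if]
        simp

-- ===== VERDICT (by name: the statement is the Claim_ definition above) =====
theorem validacao_spec : Claim_equal_validacao := by
  intro lp la _ _
  unfold Spec_validacao
  exact ports_eq lp la
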